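-- pv_equiv track=rewrite | github.com/Carolzhangzz/Multimodal-News-RecSys | scripts/clip_v3.py | _pick_primary_from_list
-- ===== SOURCE A (Python) =====
-- from typing import Optional, Tuple, List
--
-- def _pick_primary_from_list(urls: List[str]) -> Optional[str]:
--     if not urls: return None
--     # 优先高清/大图，其次避开 SRxx,yy 小缩略图
--     hi_prefs = ("SL1600", "_UL1500_", "_UL1200_", "hi_res", "large")
--     for p in hi_prefs:
--         for u in urls:
--             if p.lower() in u.lower():
--                 return u
--     for u in urls:
--         if "_SR" not in u.upper():   # 避开诸如 _SR38,50_ 的缩略图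
--             return u
--     return urls[0]
-- ===== SOURCE B (Python) =====
-- def _rank(u):
--     ul = u.lower()
--     for i, p in enumerate(("sl1600", "_ul1500_", "_ul1200_", "hi_res", "large")):
--         if p in ul:
--             return i
--     return 5 if "_SR" not in u.upper() else 6
--
--
-- def _pick_primary_from_list(urls):
--     best_rank, best_url = 7, None
--     for u in urls:
--         r = _rank(u)
--         if r < best_rank:
--             best_rank, best_url = r, u
--     return best_url
-- ===== Notes on version B (the rewrite author's own statement) =====
-- stated objective: alternative
-- what changed: Replaces six sequential scans of the url list (one per preference plus the _SR pass) by a single min-selection pass that assigns each url a priority rank and keeps the first url with the strictly smallest rank.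
import Mathlib
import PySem

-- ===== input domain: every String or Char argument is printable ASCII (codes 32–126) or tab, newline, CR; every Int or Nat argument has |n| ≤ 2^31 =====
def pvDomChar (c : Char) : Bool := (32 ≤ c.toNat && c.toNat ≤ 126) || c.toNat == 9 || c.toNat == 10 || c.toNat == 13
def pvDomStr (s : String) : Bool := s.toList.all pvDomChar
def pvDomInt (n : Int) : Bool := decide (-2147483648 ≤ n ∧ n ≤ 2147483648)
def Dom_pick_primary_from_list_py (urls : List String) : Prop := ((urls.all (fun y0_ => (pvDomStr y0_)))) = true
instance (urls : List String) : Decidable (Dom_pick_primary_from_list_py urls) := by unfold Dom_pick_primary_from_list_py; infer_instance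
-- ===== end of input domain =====

-- B replaces A's six sequential list scans by a single min-selection pass over per-url priority ranks (alternative decomposition, same cost).


-- ===== PORT A =====
-- hi_prefs tuple of A
def hiPrefsA : List String := ["SL1600", "_UL1500_", "_UL1200_", "hi_res", "large"]

-- 'for p in hi_prefs: for u in urls: if …: return u' is findSome? of find?
def pick_primary_from_list_py (urls : List String) : Option String :=
  match urls with
  | [] => none
  | u0 :: _ =>
    match hiPrefsA.findSome?
        (fun p => urls.find? (fun u => PySem.Str.isIn (PySem.Str.lower p) (PySem.Str.lower u))) with
    | some u => some u
    | none =>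
      match urls.find? (fun u => !(PySem.Str.isIn "_SR" (PySem.Str.upper u))) with
      | some u => some u
      | none => some u0

-- ===== PORT B =====
def prefsB : List String := ["sl1600", "_ul1500_", "_ul1200_", "hi_res", "large"]

-- Source B's _rank: index of the first matching preference, else 5 / 6 by the _SR test
def rankB (u : String) : Int :=
  match (PySem.List.enumerate prefsB).find? (fun ip => PySem.Str.isIn ip.2 (PySem.Str.lower u)) with
  | some (i, _) => i
  | none => if !(PySem.Str.isIn "_SR" (PySem.Str.upper u)) then 5 else 6

-- Source B's loop body: keep the first url with the strictly smallest rank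
def stepB (st : Int × Option String) (u : String) : Int × Option String :=
  if rankB u < st.1 then (rankB u, some u) else st

def pick_primary_from_list_py_alt (urls : List String) : Option String :=
  (urls.foldl stepB (7, none)).2

-- ===== PRECONDITION & SPEC =====
def Spec_pick_primary_from_list_py (urls : List String) (out : Option String) : Prop := out = pick_primary_from_list_py_alt urls
instance (urls : List String) (out : Option String) : Decidable (Spec_pick_primary_from_list_py urls out) := by unfold Spec_pick_primary_from_list_py; infer_instance

-- ===== CLAIM (what is proved, stated in full; the proofs are below) =====
def Claim_equal_pick_primary_from_list_py : Prop := ∀ (urls : List String), Dom_pick_primary_from_list_py urls → Spec_pick_primary_from_list_py urls (pick_primary_from_list_py urls)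

-- ===== LEMMAS AND PROOFS =====

def prefTest (p u : String) : Bool := PySem.Str.isIn p (PySem.Str.lower u)
def srOK (u : String) : Bool := !(PySem.Str.isIn "_SR" (PySem.Str.upper u))

-- rankB as a chain of boolean tests
theorem rankB_eq (u : String) : rankB u =
    if prefTest "sl1600" u then 0
    else if prefTest "_ul1500_" u then 1
    else if prefTest "_ul1200_" u then 2
    else if prefTest "hi_res" u then 3
    else if prefTest "large" u then 4
    else if srOK u then 5 else 6 := by
  unfold rankB prefsB prefTest srOK
  simp only [PySem.List.enumerate_cons, PySem.List.enumerate_nil, List.find?]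
  split_ifs <;> simp_all

theorem rankB_nonneg (u : String) : 0 ≤ rankB u := by
  rw [rankB_eq]; split_ifs <;> omega

theorem rankB_le_six (u : String) : rankB u ≤ 6 := by
  rw [rankB_eq]; split_ifs <;> omega

-- running minimum of the ranks, seeded with m0
def minRank (urls : List String) (m0 : Int) : Int :=
  urls.foldl (fun a u => min a (rankB u)) m0

theorem minRank_nil (m0 : Int) : minRank [] m0 = m0 := rfl

theorem minRank_cons (u : String) (t : List String) (m0 : Int) :
    minRank (u :: t) m0 = minRank t (min m0 (rankB u)) := rfl

theorem minRank_le_seed (urls : List String) (m0 : Int) : minRank urls m0 ≤ m0 := by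
  induction urls generalizing m0 with
  | nil => simp [minRank_nil]
  | cons u t ih =>
    calc minRank (u :: t) m0 = minRank t (min m0 (rankB u)) := minRank_cons ..
    _ ≤ min m0 (rankB u) := ih _
    _ ≤ m0 := min_le_left ..

theorem minRank_le_mem (urls : List String) (m0 : Int) (u : String) (hu : u ∈ urls) :
    minRank urls m0 ≤ rankB u := by
  induction urls generalizing m0 with
  | nil => cases hu
  | cons v t ih =>
    rw [minRank_cons]
    rcases List.mem_cons.mp hu with hu | hu
    · subst hu; exact le_trans (minRank_le_seed ..) (min_le_right ..)
    · exact ih _ hu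

theorem minRank_nonneg (urls : List String) (m0 : Int) (h : 0 ≤ m0) :
    0 ≤ minRank urls m0 := by
  induction urls generalizing m0 with
  | nil => simpa [minRank_nil]
  | cons v t ih =>
    rw [minRank_cons]
    exact ih _ (le_min h (rankB_nonneg v))

theorem minRank_attained (urls : List String) (m0 : Int)
    (h : minRank urls m0 < m0) : ∃ u ∈ urls, rankB u = minRank urls m0 := by
  induction urls generalizing m0 with
  | nil => simp [minRank_nil] at h
  | cons v t ih =>
    rw [minRank_cons] at h ⊢
    by_cases hlt : minRank t (min m0 (rankB v)) < min m0 (rankB v)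
    · obtain ⟨u, hu, hr⟩ := ih _ hlt
      exact ⟨u, List.mem_cons_of_mem _ hu, hr⟩
    · have hle := minRank_le_seed t (min m0 (rankB v))
      refine ⟨v, List.mem_cons_self .., ?_⟩
      omega

-- find? respects pointwise-on-members equal predicates
theorem find?_congr_mem {α : Type} (l : List α) (p q : α → Bool)
    (h : ∀ a ∈ l, p a = q a) : l.find? p = l.find? q := by
  induction l with
  | nil => rfl
  | cons a t ih =>
    simp only [List.find?_cons]
    rw [h a (List.mem_cons_self ..), ih (fun b hb => h b (List.mem_cons_of_mem _ hb))]

theorem find?_eq_none_of {α : Type} (l : List α) (p : α → Bool)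
    (h : ∀ a ∈ l, p a = false) : l.find? p = none := by
  rw [List.find?_eq_none]
  intro a ha
  simp [h a ha]

-- B's fold computes the running minimum and the FIRST url attaining it
theorem foldB_spec (urls : List String) (br : Int) (bu : Option String) :
    urls.foldl stepB (br, bu) =
      if minRank urls br < br
      then (minRank urls br, urls.find? (fun u => rankB u == minRank urls br))
      else (br, bu) := by
  induction urls generalizing br bu with
  | nil => simp [minRank_nil]
  | cons u t ih =>
    rw [List.foldl_cons, minRank_cons]
    show t.foldl stepB (if rankB u < br then (rankB u, some u) else (br, bu)) = _
    by_cases h1 : rankB u < br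
    · rw [if_pos h1, ih]
      have hmin : min br (rankB u) = rankB u := by omega
      rw [hmin]
      by_cases h2 : minRank t (rankB u) < rankB u
      · rw [if_pos h2, if_pos (lt_trans h2 h1)]
        have hne : (rankB u == minRank t (rankB u)) = false := by
          simp only [beq_eq_false_iff_ne]; omega
        rw [List.find?_cons, hne]
      · have heq : minRank t (rankB u) = rankB u :=
          le_antisymm (minRank_le_seed ..) (le_of_not_gt h2)
        rw [heq, if_neg (lt_irrefl _), if_pos h1, List.find?_cons]
        simp
    · rw [if_neg h1, ih]
      have hmin : min br (rankB u) = br := by omega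
      rw [hmin]
      by_cases h2 : minRank t br < br
      · rw [if_pos h2, if_pos h2]
        have hne : (rankB u == minRank t br) = false := by
          simp only [beq_eq_false_iff_ne]; omega
        rw [List.find?_cons, hne]
      · rw [if_neg h2, if_neg h2]

-- a url matching the i-th preference has rank at most i
theorem rank_le_of_pref0 (u : String) (h : prefTest "sl1600" u = true) : rankB u ≤ 0 := by
  rw [rankB_eq]; split_ifs <;> simp_all
theorem rank_le_of_pref1 (u : String) (h : prefTest "_ul1500_" u = true) : rankB u ≤ 1 := by
  rw [rankB_eq]; split_ifs <;> simp_all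
theorem rank_le_of_pref2 (u : String) (h : prefTest "_ul1200_" u = true) : rankB u ≤ 2 := by
  rw [rankB_eq]; split_ifs <;> simp_all
theorem rank_le_of_pref3 (u : String) (h : prefTest "hi_res" u = true) : rankB u ≤ 3 := by
  rw [rankB_eq]; split_ifs <;> simp_all
theorem rank_le_of_pref4 (u : String) (h : prefTest "large" u = true) : rankB u ≤ 4 := by
  rw [rankB_eq]; split_ifs <;> simp_all
theorem rank_le_of_srOK (u : String) (h : srOK u = true) : rankB u ≤ 5 := by
  rw [rankB_eq]; split_ifs <;> simp_all

-- on urls of rank ≥ i, the i-th test decides 'rank = i'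
theorem pref0_eq_rank (u : String) : prefTest "sl1600" u = (rankB u == 0) := by
  rw [rankB_eq]; split_ifs <;> simp_all
theorem pref1_eq_rank (u : String) (h : 1 ≤ rankB u) : prefTest "_ul1500_" u = (rankB u == 1) := by
  rw [rankB_eq] at h ⊢; split_ifs at h ⊢ <;> simp_all
theorem pref2_eq_rank (u : String) (h : 2 ≤ rankB u) : prefTest "_ul1200_" u = (rankB u == 2) := by
  rw [rankB_eq] at h ⊢; split_ifs at h ⊢ <;> simp_all
theorem pref3_eq_rank (u : String) (h : 3 ≤ rankB u) : prefTest "hi_res" u = (rankB u == 3) := by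
  rw [rankB_eq] at h ⊢; split_ifs at h ⊢ <;> simp_all
theorem pref4_eq_rank (u : String) (h : 4 ≤ rankB u) : prefTest "large" u = (rankB u == 4) := by
  rw [rankB_eq] at h ⊢; split_ifs at h ⊢ <;> simp_all
theorem srOK_eq_rank (u : String) (h : 5 ≤ rankB u) : srOK u = (rankB u == 5) := by
  rw [rankB_eq] at h ⊢; split_ifs at h ⊢ <;> simp_all

theorem rank6_of_ge (u : String) (h : 6 ≤ rankB u) : rankB u = 6 := by
  have := rankB_le_six u; omega

-- unfold A on a nonempty list into the chain of find?s over prefTest/srOK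
theorem A_cons (u0 : String) (t : List String) :
    pick_primary_from_list_py (u0 :: t) =
      match (u0 :: t).find? (fun u => prefTest "sl1600" u) with
      | some u => some u
      | none =>
        match (u0 :: t).find? (fun u => prefTest "_ul1500_" u) with
        | some u => some u
        | none =>
          match (u0 :: t).find? (fun u => prefTest "_ul1200_" u) with
          | some u => some u
          | none =>
            match (u0 :: t).find? (fun u => prefTest "hi_res" u) with
            | some u => some u
            | none =>
              match (u0 :: t).find? (fun u => prefTest "large" u) with
              | some u => some u
              | none =>
                match (u0 :: t).find? (fun u => srOK u) with
                | some u => some u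
                | none => some u0 := by
  have l0 : PySem.Str.lower "SL1600" = "sl1600" := by decide
  have l1 : PySem.Str.lower "_UL1500_" = "_ul1500_" := by decide
  have l2 : PySem.Str.lower "_UL1200_" = "_ul1200_" := by decide
  have l3 : PySem.Str.lower "hi_res" = "hi_res" := by decide
  have l4 : PySem.Str.lower "large" = "large" := by decide
  simp only [pick_primary_from_list_py, hiPrefsA, List.findSome?_cons, List.findSome?_nil,
    l0, l1, l2, l3, l4, prefTest, srOK]
  cases (u0 :: t).find? (fun u => PySem.Str.isIn "sl1600" (PySem.Str.lower u)) with
  | some u => rfl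
  | none =>
  cases (u0 :: t).find? (fun u => PySem.Str.isIn "_ul1500_" (PySem.Str.lower u)) with
  | some u => rfl
  | none =>
  cases (u0 :: t).find? (fun u => PySem.Str.isIn "_ul1200_" (PySem.Str.lower u)) with
  | some u => rfl
  | none =>
  cases (u0 :: t).find? (fun u => PySem.Str.isIn "hi_res" (PySem.Str.lower u)) with
  | some u => rfl
  | none =>
  cases (u0 :: t).find? (fun u => PySem.Str.isIn "large" (PySem.Str.lower u)) with
  | some u => rfl
  | none =>
  cases (u0 :: t).find? (fun u => !PySem.Str.isIn "_SR" (PySem.Str.upper u)) with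
  | some u => rfl
  | none => rfl

-- ===== VERDICT (by name: the statement is the Claim_ definition above) =====
theorem pick_primary_from_list_py_spec : Claim_equal_pick_primary_from_list_py := by
  intro urls _
  unfold Spec_pick_primary_from_list_py
  cases urls with
  | nil => rfl
  | cons u0 t =>
    have hm7 : minRank (u0 :: t) 7 < 7 :=
      lt_of_le_of_lt (le_trans (minRank_le_mem _ 7 u0 (List.mem_cons_self ..)) (rankB_le_six u0)) (by omega)
    have hB : pick_primary_from_list_py_alt (u0 :: t) =
        (u0 :: t).find? (fun u => rankB u == minRank (u0 :: t) 7) := by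
      unfold pick_primary_from_list_py_alt
      rw [foldB_spec, if_pos hm7]
    have hmin : ∀ u ∈ u0 :: t, minRank (u0 :: t) 7 ≤ rankB u :=
      fun u hu => minRank_le_mem _ _ u hu
    obtain ⟨w, hw, hwr⟩ := minRank_attained _ _ hm7
    have h0m : 0 ≤ minRank (u0 :: t) 7 := minRank_nonneg _ _ (by omega)
    have h6m : minRank (u0 :: t) 7 ≤ 6 := hwr ▸ rankB_le_six w
    set m := minRank (u0 :: t) 7 with hmdef
    rw [hB, A_cons]
    have hnone0 : (∀ u ∈ u0 :: t, 1 ≤ rankB u) →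
        (u0 :: t).find? (fun u => prefTest "sl1600" u) = none := fun hge =>
      find?_eq_none_of _ _ (fun u hu => by
        by_contra hc
        have := rank_le_of_pref0 u (by simpa using hc)
        have := hge u hu; omega)
    have hnone1 : (∀ u ∈ u0 :: t, 2 ≤ rankB u) →
        (u0 :: t).find? (fun u => prefTest "_ul1500_" u) = none := fun hge =>
      find?_eq_none_of _ _ (fun u hu => by
        by_contra hc
        have := rank_le_of_pref1 u (by simpa using hc)
        have := hge u hu; omega)
    have hnone2 : (∀ u ∈ u0 :: t, 3 ≤ rankB u) →
        (u0 :: t).find? (fun u => prefTest "_ul1200_" u) = none := fun hge =>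
      find?_eq_none_of _ _ (fun u hu => by
        by_contra hc
        have := rank_le_of_pref2 u (by simpa using hc)
        have := hge u hu; omega)
    have hnone3 : (∀ u ∈ u0 :: t, 4 ≤ rankB u) →
        (u0 :: t).find? (fun u => prefTest "hi_res" u) = none := fun hge =>
      find?_eq_none_of _ _ (fun u hu => by
        by_contra hc
        have := rank_le_of_pref3 u (by simpa using hc)
        have := hge u hu; omega)
    have hnone4 : (∀ u ∈ u0 :: t, 5 ≤ rankB u) →
        (u0 :: t).find? (fun u => prefTest "large" u) = none := fun hge =>
      find?_eq_none_of _ _ (fun u hu => by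
        by_contra hc
        have := rank_le_of_pref4 u (by simpa using hc)
        have := hge u hu; omega)
    have hnone5 : (∀ u ∈ u0 :: t, 6 ≤ rankB u) →
        (u0 :: t).find? (fun u => srOK u) = none := fun hge =>
      find?_eq_none_of _ _ (fun u hu => by
        by_contra hc
        have := rank_le_of_srOK u (by simpa using hc)
        have := hge u hu; omega)
    interval_cases m
    · -- m = 0
      rcases h : (u0 :: t).find? (fun u => prefTest "sl1600" u) with _ | u
      · rw [find?_congr_mem _ _ (fun u => rankB u == 0)
          (fun u _ => pref0_eq_rank u)] at h
        exact absurd (List.find?_eq_none.mp h w hw) (by simp [hwr])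
      · rw [find?_congr_mem _ (fun u => prefTest "sl1600" u) (fun u => rankB u == 0)
          (fun u _ => pref0_eq_rank u)] at h
        rw [h]
    · -- m = 1
      have hge : ∀ u ∈ u0 :: t, 1 ≤ rankB u := hmin
      rw [hnone0 hge]
      rcases h : (u0 :: t).find? (fun u => prefTest "_ul1500_" u) with _ | u
      · rw [find?_congr_mem _ _ (fun u => rankB u == 1)
          (fun u hu => pref1_eq_rank u (hge u hu))] at h
        exact absurd (List.find?_eq_none.mp h w hw) (by simp [hwr])
      · rw [find?_congr_mem _ (fun u => prefTest "_ul1500_" u) (fun u => rankB u == 1)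
          (fun u hu => pref1_eq_rank u (hge u hu))] at h
        rw [h]
    · -- m = 2
      have hge : ∀ u ∈ u0 :: t, 2 ≤ rankB u := hmin
      rw [hnone0 (fun u hu => by have := hge u hu; omega), hnone1 hge]
      rcases h : (u0 :: t).find? (fun u => prefTest "_ul1200_" u) with _ | u
      · rw [find?_congr_mem _ _ (fun u => rankB u == 2)
          (fun u hu => pref2_eq_rank u (hge u hu))] at h
        exact absurd (List.find?_eq_none.mp h w hw) (by simp [hwr])
      · rw [find?_congr_mem _ (fun u => prefTest "_ul1200_" u) (fun u => rankB u == 2)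
          (fun u hu => pref2_eq_rank u (hge u hu))] at h
        rw [h]
    · -- m = 3
      have hge : ∀ u ∈ u0 :: t, 3 ≤ rankB u := hmin
      rw [hnone0 (fun u hu => by have := hge u hu; omega),
        hnone1 (fun u hu => by have := hge u hu; omega), hnone2 hge]
      rcases h : (u0 :: t).find? (fun u => prefTest "hi_res" u) with _ | u
      · rw [find?_congr_mem _ _ (fun u => rankB u == 3)
          (fun u hu => pref3_eq_rank u (hge u hu))] at h
        exact absurd (List.find?_eq_none.mp h w hw) (by simp [hwr])
      · rw [find?_congr_mem _ (fun u => prefTest "hi_res" u) (fun u => rankB u == 3)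
          (fun u hu => pref3_eq_rank u (hge u hu))] at h
        rw [h]
    · -- m = 4
      have hge : ∀ u ∈ u0 :: t, 4 ≤ rankB u := hmin
      rw [hnone0 (fun u hu => by have := hge u hu; omega),
        hnone1 (fun u hu => by have := hge u hu; omega),
        hnone2 (fun u hu => by have := hge u hu; omega), hnone3 hge]
      rcases h : (u0 :: t).find? (fun u => prefTest "large" u) with _ | u
      · rw [find?_congr_mem _ _ (fun u => rankB u == 4)
          (fun u hu => pref4_eq_rank u (hge u hu))] at h
        exact absurd (List.find?_eq_none.mp h w hw) (by simp [hwr])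
      · rw [find?_congr_mem _ (fun u => prefTest "large" u) (fun u => rankB u == 4)
          (fun u hu => pref4_eq_rank u (hge u hu))] at h
        rw [h]
    · -- m = 5
      have hge : ∀ u ∈ u0 :: t, 5 ≤ rankB u := hmin
      rw [hnone0 (fun u hu => by have := hge u hu; omega),
        hnone1 (fun u hu => by have := hge u hu; omega),
        hnone2 (fun u hu => by have := hge u hu; omega),
        hnone3 (fun u hu => by have := hge u hu; omega), hnone4 hge]
      rcases h : (u0 :: t).find? (fun u => srOK u) with _ | u
      · rw [find?_congr_mem _ _ (fun u => rankB u == 5)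
          (fun u hu => srOK_eq_rank u (hge u hu))] at h
        exact absurd (List.find?_eq_none.mp h w hw) (by simp [hwr])
      · rw [find?_congr_mem _ (fun u => srOK u) (fun u => rankB u == 5)
          (fun u hu => srOK_eq_rank u (hge u hu))] at h
        rw [h]
    · -- m = 6
      have hge : ∀ u ∈ u0 :: t, 6 ≤ rankB u := hmin
      rw [hnone0 (fun u hu => by have := hge u hu; omega),
        hnone1 (fun u hu => by have := hge u hu; omega),
        hnone2 (fun u hu => by have := hge u hu; omega),
        hnone3 (fun u hu => by have := hge u hu; omega),
        hnone4 (fun u hu => by have := hge u hu; omega), hnone5 hge]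
      have h0 : rankB u0 = 6 := rank6_of_ge u0 (hge u0 (List.mem_cons_self ..))
      rw [List.find?_cons]
      simp [h0]
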